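-- pv_equiv track=rewrite | github.com/folded/bagz-index | src/bagz_index/trigram.py | _ngram_to_index
-- ===== SOURCE A (Python) =====
-- def _ngram_to_index(ngram: str, char_map: dict[str, int]) -> int:
--   base = len(char_map)
--   index = 0
--   for char in ngram:
--     if char not in char_map:
--       return -1
--     index = index * base + char_map[char]
--   return index
-- ===== SOURCE B (Python) =====
-- def _ngram_to_index(ngram: str, char_map: dict[str, int]) -> int:
--   # validation pass first; then a back-to-front accumulation with explicit powers
--   if any(c not in char_map for c in ngram):
--     return -1
--   base = len(char_map)
--   total = 0
--   power = 1
--   for c in reversed(ngram):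
--     total += char_map[c] * power
--     power *= base
--   return total
-- ===== Notes on version B (the rewrite author's own statement) =====
-- stated objective: alternative
-- what changed: B splits A's fused guarded Horner loop into a separate validation pass (any) followed by a back-to-front accumulation that sums char_map[c] times an explicitly maintained power of the base, instead of A's front-to-back index*base+v with an early return.
import Mathlib
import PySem

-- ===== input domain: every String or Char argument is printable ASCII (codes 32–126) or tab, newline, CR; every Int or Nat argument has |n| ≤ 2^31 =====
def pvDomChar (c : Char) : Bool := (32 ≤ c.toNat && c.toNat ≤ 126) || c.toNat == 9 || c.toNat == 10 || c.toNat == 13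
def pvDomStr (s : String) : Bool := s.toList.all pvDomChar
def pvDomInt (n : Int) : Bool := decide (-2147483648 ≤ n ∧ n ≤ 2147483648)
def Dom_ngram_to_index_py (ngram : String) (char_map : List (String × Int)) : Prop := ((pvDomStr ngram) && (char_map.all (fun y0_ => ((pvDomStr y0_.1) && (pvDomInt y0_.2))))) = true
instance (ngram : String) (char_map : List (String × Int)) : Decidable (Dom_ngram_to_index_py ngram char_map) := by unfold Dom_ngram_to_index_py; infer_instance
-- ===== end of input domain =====

-- ===== PORT A =====
-- B differs from A by design (validation pass + reversed power accumulation vs fused guarded Horner loop); return values proved equal.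
-- helper: A's for-loop with early 'return -1' (char_map[char] read as getD under the contains guard, so it is exact)
def ngramLoopA (d : PySem.Dict String Int) (base : Int) : List Char → Int → Int
  | [], index => index
  | c :: rest, index =>
    if d.contains c.toString then
      ngramLoopA d base rest (index * base + d.getD c.toString 0)
    else -1

def ngram_to_index_py (ngram : String) (char_map : List (String × Int)) : Int :=
  let d := PySem.Dict.ofList char_map
  ngramLoopA d d.size ngram.toList 0

-- ===== PORT B =====
def ngram_to_index_py_alt (ngram : String) (char_map : List (String × Int)) : Int :=
  let d := PySem.Dict.ofList char_map
  if ngram.toList.any (fun c => !(d.contains c.toString)) then -1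
  else
    let base : Int := d.size
    (ngram.toList.reverse.foldl
      (fun (st : Int × Int) c => (st.1 + d.getD c.toString 0 * st.2, st.2 * base)) (0, 1)).1

-- ===== PRECONDITION & SPEC =====
def Spec_ngram_to_index_py (ngram : String) (char_map : List (String × Int)) (out : Int) : Prop := out = ngram_to_index_py_alt ngram char_map
instance (ngram : String) (char_map : List (String × Int)) (out : Int) : Decidable (Spec_ngram_to_index_py ngram char_map out) := by unfold Spec_ngram_to_index_py; infer_instance

-- ===== CLAIM (what is proved, stated in full; the proofs are below) =====
def Claim_equal_ngram_to_index_py : Prop := ∀ (ngram : String) (char_map : List (String × Int)), Dom_ngram_to_index_py ngram char_map → Spec_ngram_to_index_py ngram char_map (ngram_to_index_py ngram char_map)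

-- ===== LEMMAS AND PROOFS =====

lemma ngramLoopA_miss (d : PySem.Dict String Int) (base : Int) :
    ∀ (cs : List Char) (idx : Int), cs.any (fun c => !(d.contains c.toString)) = true →
      ngramLoopA d base cs idx = -1 := by
  intro cs
  induction cs with
  | nil => intro idx h; simp at h
  | cons c rest ih =>
    intro idx h
    rw [List.any_cons, Bool.or_eq_true] at h
    by_cases hc : d.contains c.toString
    · simp only [ngramLoopA, hc, if_true]
      apply ih
      rcases h with h | h
      · rw [hc] at h; simp at h
      · exact h
    · simp only [ngramLoopA, hc]; rfl

lemma ngramLoopA_hit (d : PySem.Dict String Int) (base : Int) :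
    ∀ (cs : List Char) (idx : Int), cs.all (fun c => d.contains c.toString) = true →
      ngramLoopA d base cs idx
        = idx * base ^ cs.length
          + (cs.foldr (fun c (st : Int × Int) => (st.1 + d.getD c.toString 0 * st.2, st.2 * base)) (0, 1)).1
      ∧ (cs.foldr (fun c (st : Int × Int) => (st.1 + d.getD c.toString 0 * st.2, st.2 * base)) (0, 1)).2
          = base ^ cs.length := by
  intro cs
  induction cs with
  | nil => intro idx _; simp [ngramLoopA]
  | cons c rest ih =>
    intro idx h
    rw [List.all_cons, Bool.and_eq_true] at h
    obtain ⟨hc, hrest⟩ := h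
    obtain ⟨ih1, ih2⟩ := ih (idx * base + d.getD c.toString 0) hrest
    constructor
    · simp only [ngramLoopA, hc, if_true, List.foldr_cons, List.length_cons, ih1, ih2]
      ring
    · simp only [List.foldr_cons, List.length_cons, ih2]
      ring

-- ===== VERDICT (by name: the statement is the Claim_ definition above) =====
theorem ngram_to_index_py_spec : Claim_equal_ngram_to_index_py := by
  intro ngram char_map _
  unfold Spec_ngram_to_index_py ngram_to_index_py ngram_to_index_py_alt
  set d := PySem.Dict.ofList char_map with hd
  by_cases h : ngram.toList.any (fun c => !(d.contains c.toString)) = true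
  · simp only [h, if_true]
    exact ngramLoopA_miss d d.size ngram.toList 0 h
  · simp only [h]
    have hall : ngram.toList.all (fun c => d.contains c.toString) = true := by
      rw [List.all_eq_true]
      intro c hc
      by_contra hcc
      rw [Bool.not_eq_true] at hcc
      apply h
      rw [List.any_eq_true]
      exact ⟨c, hc, by rw [hcc]; rfl⟩
    obtain ⟨h1, _⟩ := ngramLoopA_hit d d.size ngram.toList 0 hall
    rw [h1, List.foldl_reverse]
    simp
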